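-- pv_equiv track=rewrite | github.com/codazm/Kicad-PCB-Generator | src/kicad-pcb-generator/core/analysis/high_frequency_coupling.py | _is_opamp_component
-- ===== SOURCE A (Python) =====
-- def _is_opamp_component(ref: str, value: str) -> bool:
--     """Check if component is an op-amp."""
--     ref_upper = ref.upper()
--     value_upper = value.upper()
--
--     opamp_identifiers = ['OP', 'OPA', 'TL', 'NE', 'LM', 'AD', 'LT']
--
--     for identifier in opamp_identifiers:
--         if identifier in ref_upper or identifier in value_upper:
--             return True
--
--     return False
-- ===== SOURCE B (Python) =====
-- def _is_opamp_component(ref: str, value: str) -> bool: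
--     """Check if component is an op-amp.
--
--     Single pass over adjacent character pairs: every identifier in A's list
--     ('OP','OPA','TL','NE','LM','AD','LT') occurs in a string iff one of the
--     six two-letter pairs below occurs ('OPA' is subsumed by 'OP').
--     """
--     pairs = {'OP', 'TL', 'NE', 'LM', 'AD', 'LT'}
--     for s in (ref.upper(), value.upper()):
--         if any(a + b in pairs for a, b in zip(s, s[1:])):
--             return True
--     return False
-- ===== Notes on version B (the rewrite author's own statement) =====
-- stated objective: alternative
-- what changed: Replaced the loop over seven identifiers (one substring scan each) by a single pass over adjacent character pairs of each uppercased string, checking membership in the set of six two-letter prefixes ('OPA' is subsumed by 'OP').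
import Mathlib
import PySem

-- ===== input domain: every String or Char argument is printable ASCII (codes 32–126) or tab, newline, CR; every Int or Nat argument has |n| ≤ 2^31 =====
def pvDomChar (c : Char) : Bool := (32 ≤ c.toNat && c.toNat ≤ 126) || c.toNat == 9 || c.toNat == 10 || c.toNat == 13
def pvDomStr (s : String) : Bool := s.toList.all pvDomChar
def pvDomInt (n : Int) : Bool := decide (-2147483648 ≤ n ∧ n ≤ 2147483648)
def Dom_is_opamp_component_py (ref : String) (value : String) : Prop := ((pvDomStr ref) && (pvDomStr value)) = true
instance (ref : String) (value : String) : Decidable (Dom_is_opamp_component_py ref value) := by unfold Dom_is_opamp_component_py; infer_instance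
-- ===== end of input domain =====

-- B replaces A's loop over seven identifiers (one substring scan each) by a single
-- pass over adjacent character pairs of each uppercased string ('OPA' is subsumed by 'OP').

-- ===== PORT A =====
-- the for-loop over the identifier list, with early return on a hit
def opampLoop (ids : List String) (refU valueU : String) : Bool :=
  match ids with
  | [] => false
  | identifier :: rest =>
    if PySem.Str.isIn identifier refU || PySem.Str.isIn identifier valueU then true
    else opampLoop rest refU valueU

def is_opamp_component_py (ref : String) (value : String) : Bool :=
  let ref_upper := PySem.Str.upper ref
  let value_upper := PySem.Str.upper value
  let opamp_identifiers := ["OP", "OPA", "TL", "NE", "LM", "AD", "LT"]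
  opampLoop opamp_identifiers ref_upper value_upper

-- ===== PORT B =====
-- a + b in {'OP','TL','NE','LM','AD','LT'}
def isOpampPair (a b : Char) : Bool :=
  (a == 'O' && b == 'P') || (a == 'T' && b == 'L') || (a == 'N' && b == 'E') ||
  (a == 'L' && b == 'M') || (a == 'A' && b == 'D') || (a == 'L' && b == 'T')

-- any(a + b in pairs for a, b in zip(s, s[1:]))
def pairScan (s : List Char) : Bool :=
  match s with
  | a :: b :: rest => isOpampPair a b || pairScan (b :: rest)
  | _ => false

def is_opamp_component_py_alt (ref : String) (value : String) : Bool :=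
  pairScan (PySem.Str.upper ref).toList || pairScan (PySem.Str.upper value).toList

-- ===== PRECONDITION & SPEC =====
def Spec_is_opamp_component_py (ref : String) (value : String) (out : Bool) : Prop := out = is_opamp_component_py_alt ref value
instance (ref : String) (value : String) (out : Bool) : Decidable (Spec_is_opamp_component_py ref value out) := by unfold Spec_is_opamp_component_py; infer_instance

-- ===== CLAIM (what is proved, stated in full; the proofs are below) =====
def Claim_equal_is_opamp_component_py : Prop := ∀ (ref : String) (value : String), Dom_is_opamp_component_py ref value → Spec_is_opamp_component_py ref value (is_opamp_component_py ref value)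

-- ===== LEMMAS AND PROOFS =====

-- pairScan finds exactly the two-element infixes that form an op-amp pair
theorem pairScan_iff (s : List Char) :
    pairScan s = true ↔ ∃ a b, isOpampPair a b = true ∧ [a, b] <:+: s := by
  induction s with
  | nil => simp [pairScan]
  | cons x t ih =>
    match t, ih with
    | [], _ =>
      simp only [pairScan]
      constructor
      · intro h; cases h
      · rintro ⟨a, b, -, h⟩
        have := h.length_le; simp at this
    | y :: r, ih =>
      simp only [pairScan, Bool.or_eq_true, ih]
      constructor
      · rintro (h | ⟨a, b, hp, hi⟩)
        · exact ⟨x, y, h, ⟨[], r, rfl⟩⟩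
        · exact ⟨a, b, hp, hi.trans (List.suffix_cons x (y :: r)).isInfix⟩
      · rintro ⟨a, b, hp, hi⟩
        rcases List.infix_cons_iff.mp hi with hpre | hinf
        · obtain ⟨u, hu⟩ := hpre
          injection hu with h1 h2
          injection h2 with h3 _
          subst h1; subst h3
          exact Or.inl hp
        · exact Or.inr ⟨a, b, hp, hinf⟩

-- extract the six concrete pairs from isOpampPair
theorem isOpampPair_cases {a b : Char} (h : isOpampPair a b = true) :
    (a = 'O' ∧ b = 'P') ∨ (a = 'T' ∧ b = 'L') ∨ (a = 'N' ∧ b = 'E') ∨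
    (a = 'L' ∧ b = 'M') ∨ (a = 'A' ∧ b = 'D') ∨ (a = 'L' ∧ b = 'T') := by
  simp only [isOpampPair, Bool.or_eq_true, Bool.and_eq_true, beq_iff_eq] at h
  tauto

-- A's early-return loop hits iff some identifier in the list is in one of the strings
theorem opampLoop_iff (ids : List String) (r v : String) :
    opampLoop ids r v = true ↔
      ∃ id ∈ ids, (PySem.Str.isIn id r = true ∨ PySem.Str.isIn id v = true) := by
  induction ids with
  | nil => simp [opampLoop]
  | cons i rest ih =>
    simp only [opampLoop, List.mem_cons]
    by_cases h : (PySem.Str.isIn i r || PySem.Str.isIn i v) = true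
    · simp only [if_pos h, true_iff]
      rw [Bool.or_eq_true] at h
      rcases h with h' | h'
      · exact ⟨i, Or.inl rfl, Or.inl h'⟩
      · exact ⟨i, Or.inl rfl, Or.inr h'⟩
    · simp only [if_neg h, ih]
      rw [Bool.or_eq_true, not_or, Bool.not_eq_true, Bool.not_eq_true] at h
      constructor
      · rintro ⟨id, hm, hin⟩; exact ⟨id, Or.inr hm, hin⟩
      · rintro ⟨id, rfl | hm, hin⟩
        · rcases hin with h' | h' <;> rw [PySem.Str.isIn_eq] at h' <;> simp [h'] at h
        · exact ⟨id, hm, hin⟩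

-- A's loop on the literal identifier list equals B's pair scan, for any two strings
theorem loop_eq_scan (r v : String) :
    opampLoop ["OP", "OPA", "TL", "NE", "LM", "AD", "LT"] r v =
      (pairScan r.toList || pairScan v.toList) := by
  rw [Bool.eq_iff_iff, opampLoop_iff]
  simp only [Bool.or_eq_true, pairScan_iff, List.mem_cons, List.not_mem_nil, or_false,
    PySem.Str.isIn_iff_infix]
  have sub : ∀ (s : List Char), "OPA".toList <:+: s → ['O', 'P'] <:+: s := fun s h =>
    (List.IsPrefix.isInfix ⟨['A'], rfl⟩).trans h
  constructor
  · rintro ⟨id, hid, hin⟩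
    rcases hid with rfl | rfl | rfl | rfl | rfl | rfl | rfl <;>
      rcases hin with h | h
    · exact Or.inl ⟨'O', 'P', by decide, h⟩
    · exact Or.inr ⟨'O', 'P', by decide, h⟩
    · exact Or.inl ⟨'O', 'P', by decide, sub _ h⟩
    · exact Or.inr ⟨'O', 'P', by decide, sub _ h⟩
    · exact Or.inl ⟨'T', 'L', by decide, h⟩
    · exact Or.inr ⟨'T', 'L', by decide, h⟩
    · exact Or.inl ⟨'N', 'E', by decide, h⟩
    · exact Or.inr ⟨'N', 'E', by decide, h⟩
    · exact Or.inl ⟨'L', 'M', by decide, h⟩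
    · exact Or.inr ⟨'L', 'M', by decide, h⟩
    · exact Or.inl ⟨'A', 'D', by decide, h⟩
    · exact Or.inr ⟨'A', 'D', by decide, h⟩
    · exact Or.inl ⟨'L', 'T', by decide, h⟩
    · exact Or.inr ⟨'L', 'T', by decide, h⟩
  · rintro (⟨a, b, hp, hi⟩ | ⟨a, b, hp, hi⟩) <;>
      rcases isOpampPair_cases hp with ⟨rfl, rfl⟩ | ⟨rfl, rfl⟩ | ⟨rfl, rfl⟩ | ⟨rfl, rfl⟩ |
        ⟨rfl, rfl⟩ | ⟨rfl, rfl⟩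
    · exact ⟨"OP", by simp, Or.inl hi⟩
    · exact ⟨"TL", by simp, Or.inl hi⟩
    · exact ⟨"NE", by simp, Or.inl hi⟩
    · exact ⟨"LM", by simp, Or.inl hi⟩
    · exact ⟨"AD", by simp, Or.inl hi⟩
    · exact ⟨"LT", by simp, Or.inl hi⟩
    · exact ⟨"OP", by simp, Or.inr hi⟩
    · exact ⟨"TL", by simp, Or.inr hi⟩
    · exact ⟨"NE", by simp, Or.inr hi⟩
    · exact ⟨"LM", by simp, Or.inr hi⟩
    · exact ⟨"AD", by simp, Or.inr hi⟩
    · exact ⟨"LT", by simp, Or.inr hi⟩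

-- ===== VERDICT (by name: the statement is the Claim_ definition above) =====
theorem is_opamp_component_py_spec : Claim_equal_is_opamp_component_py := by
  intro ref value _
  unfold Spec_is_opamp_component_py is_opamp_component_py is_opamp_component_py_alt
  exact loop_eq_scan _ _
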